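-- pv_equiv track=rewrite | github.com/avichaigel/Mock-IMDB | ex7.py | make_dict
-- ===== SOURCE A (Python) =====
-- def make_dict(line, movie_dict):
--     """
--     Receive line from file and turn it into keys and values in dictionary
--
--     Keyword Arguments:
--     line: current line of received file
--     movie_dict: the dictionary we're creating of the data base
--     Return: the dictionary after filling in the current line from the file
--     """
--     temp_list = line.split(',')
--     # first object in list is always the actor
--     actor = temp_list[0]
--     for i in range(1, len(temp_list)):
--         # remove space from left, and \n from right for last object
--         tmp_movie = temp_list[i].lstrip().rstrip("\n")
--         # add actor as value to the movie key. If movie doesn't exist as a key, create it and then add actor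
--         if tmp_movie in movie_dict:
--             movie_dict[tmp_movie].add(actor)
--         else:
--             movie_dict[tmp_movie] = set()
--             movie_dict[tmp_movie].add(actor)
--     # turn the set of movies and actors into a sorted dictionary
--     movie_dict = dict(sorted(zip(movie_dict.keys(), movie_dict.values())))
--     return movie_dict
-- ===== SOURCE B (Python) =====
-- def make_dict(line, movie_dict):
--     # Same return value as the original; builds a fresh dict (no mutation of the argument).
--     fields = line.split(',')
--     actor = fields[0]
--     movies = {f.lstrip().rstrip("\n") for f in fields[1:]}
--     result = {k: (v | {actor} if k in movies else v) for k, v in movie_dict.items()}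
--     for m in movies:
--         if m not in result:
--             result[m] = {actor}
--     return dict(sorted(result.items()))
-- ===== Notes on version B (the rewrite author's own statement) =====
-- stated objective: alternative
-- what changed: A walks the CSV fields mutating the dict (membership test + set-mutation per field) and then sorts; B parses the fields once into a set of movie names, rebuilds the dict in a single pass over movie_dict (union per touched key), appends the genuinely new movies, and sorts - no mutation of the argument.
import Mathlib
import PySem

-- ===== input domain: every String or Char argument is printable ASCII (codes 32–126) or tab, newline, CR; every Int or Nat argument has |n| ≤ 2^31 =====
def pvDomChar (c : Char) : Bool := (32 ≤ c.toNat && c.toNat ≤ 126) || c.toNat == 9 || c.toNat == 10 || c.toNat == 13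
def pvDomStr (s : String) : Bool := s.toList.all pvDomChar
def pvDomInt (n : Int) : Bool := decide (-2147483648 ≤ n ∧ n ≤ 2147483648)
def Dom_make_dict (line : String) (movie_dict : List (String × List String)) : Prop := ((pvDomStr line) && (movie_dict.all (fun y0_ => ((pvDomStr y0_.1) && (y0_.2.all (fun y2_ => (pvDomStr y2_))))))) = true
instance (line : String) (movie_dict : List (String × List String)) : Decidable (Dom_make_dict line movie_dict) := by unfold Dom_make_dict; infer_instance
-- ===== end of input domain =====

-- B rebuilds the dict by one pass over movie_dict plus the parsed movie set (no per-field dict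
-- mutation); return values proved equal; A mutates its movie_dict argument in place, B does not.


-- shared helpers for both ports (the two Pythons contain the same two expressions):
-- line.split(',') — the separator is the non-empty literal ",", so split? is always `some`
def pvSplitComma (s : String) : List String := (PySem.Str.split? s ",").getD [""]
-- f.lstrip().rstrip("\n") — PySem has no rstrip-with-chars; the trailing part is an exact hand
-- port of rstrip("\n") (drop trailing '\n' characters)
def pvClean (s : String) : String :=
  String.ofList (((PySem.Str.lstrip s).toList.reverse.dropWhile (fun c => c == '\n')).reverse)

-- ===== PORT A =====
def make_dict (line : String) (movie_dict : List (String × List String)) : List (String × List String) :=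
  let temp_list := pvSplitComma line
  -- temp_list[0]: split(',') never returns an empty list, so index 0 never raises
  let actor := temp_list.headD ""
  let d : PySem.Dict String (List String) := PySem.Dict.mk movie_dict
  -- for i in range(1, len(temp_list)): …   (i is always in range, so temp_list[i] never raises)
  let d := (PySem.List.pyRange 1 (temp_list.length : Int)).foldl (fun d i =>
      let tmp_movie := pvClean (PySem.List.pyGetD temp_list i "")
      if d.contains tmp_movie then
        d.insert tmp_movie (PySem.Set.add (d.getD tmp_movie []) actor)
      else
        -- movie_dict[tmp_movie] = set(); movie_dict[tmp_movie].add(actor)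
        let d1 := d.insert tmp_movie PySem.Set.empty
        d1.insert tmp_movie (PySem.Set.add (d1.getD tmp_movie PySem.Set.empty) actor)) d
  -- dict(sorted(zip(keys, values))): keys are unique (Pre_), so Python's tuple comparison only
  -- ever compares the keys — sorting by the key is exact here
  PySem.List.sorted d.items (fun p => p.1) false

-- ===== PORT B =====
def make_dict_alt (line : String) (movie_dict : List (String × List String)) : List (String × List String) :=
  let fields := pvSplitComma line
  let actor := fields.headD ""
  -- movies = {f.lstrip().rstrip("\n") for f in fields[1:]}
  let movies : PySem.Set String :=
    PySem.Set.ofList ((PySem.List.slice fields (some 1) none).map pvClean)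
  -- result = {k: (v | {actor} if k in movies else v) for k, v in movie_dict.items()}
  -- (keys unchanged, so the dict comprehension is a map over the items)
  let base : PySem.Dict String (List String) :=
    PySem.Dict.mk (movie_dict.map (fun kv =>
      if PySem.Set.contains movies kv.1 then (kv.1, PySem.Set.union kv.2 [actor]) else kv))
  -- for m in movies: if m not in result: result[m] = {actor}
  -- (Python iterates the set in unspecified order; every iteration order yields the same dict,
  -- and this fold uses the deterministic PySem.Set order)
  let result := movies.foldl (fun r m =>
      if r.contains m then r else r.insert m (PySem.Set.ofList [actor])) base
  PySem.List.sorted result.items (fun p => p.1) false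

-- ===== PRECONDITION & SPEC =====
-- Pre_ excludes association lists with duplicate movie keys: they do not denote a Python dict
-- (the dict argument collapses duplicates before A runs), and on them the ports' first-match
-- convention makes any result accidental.
def Pre_make_dict (line : String) (movie_dict : List (String × List String)) : Prop :=
  (movie_dict.map Prod.fst).Nodup
instance (line : String) (movie_dict : List (String × List String)) : Decidable (Pre_make_dict line movie_dict) := by unfold Pre_make_dict; infer_instance

def pvWitness_make_dict : String × (List (String × List String)) :=
  ("ann, movie1,movie2\n", [("movie1", ["bob"])])

def Spec_make_dict (line : String) (movie_dict : List (String × List String)) (out : List (String × List String)) : Prop := out = make_dict_alt line movie_dict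
instance (line : String) (movie_dict : List (String × List String)) (out : List (String × List String)) : Decidable (Spec_make_dict line movie_dict out) := by unfold Spec_make_dict; infer_instance

-- ===== CLAIM (what is proved, stated in full; the proofs are below) =====
def Claim_equal_make_dict : Prop := ∀ (line : String) (movie_dict : List (String × List String)), Dom_make_dict line movie_dict → Pre_make_dict line movie_dict → Spec_make_dict line movie_dict (make_dict line movie_dict)

-- ===== LEMMAS AND PROOFS =====

-- s.add(x) is idempotent: adding the same element twice is adding it once
lemma pvAddIdem (s : PySem.Set String) (a : String) :
    PySem.Set.add (PySem.Set.add s a) a = PySem.Set.add s a := by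
  by_cases h : a ∈ s <;> simp [PySem.Set.add, PySem.Set.contains, h]

-- the keys a left-to-right scan of ms appends to a dict whose key list is `seen`
-- (first occurrence of each key not already in `seen`), used to characterise both ports
def pvNew : List String → List String → List String
  | [], _ => []
  | m :: t, seen => if m ∈ seen then pvNew t seen else m :: pvNew t (seen ++ [m])

lemma pvNew_congr : ∀ (ms seen seen' : List String),
    (∀ x, x ∈ seen ↔ x ∈ seen') → pvNew ms seen = pvNew ms seen' := by
  intro ms
  induction ms with
  | nil => intro _ _ _; rfl
  | cons m t ih =>
    intro seen seen' h
    by_cases hm : m ∈ seen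
    · rw [pvNew, pvNew, if_pos hm, if_pos ((h m).mp hm), ih _ _ h]
    · rw [pvNew, pvNew, if_neg hm, if_neg (fun hx => hm ((h m).mpr hx))]
      refine congrArg _ (ih _ _ (fun x => ?_))
      simp only [List.mem_append, List.mem_singleton, h x]

lemma pvRangeMap (xs : List String) : ∀ (n k : Nat), xs.length - k = n →
    (PySem.List.pyRange (k : Int) (xs.length : Int)).map (fun i => PySem.List.pyGetD xs i "")
      = xs.drop k := by
  intro n
  induction n with
  | zero =>
    intro k hk
    have hle : xs.length ≤ k := by omega
    have h1 : PySem.List.pyRange (k : Int) (xs.length : Int) = [] := by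
      simp [PySem.List.pyRange]
      omega
    rw [h1, List.drop_eq_nil_of_le hle, List.map_nil]
  | succ n ih =>
    intro k hk
    have hkl : k < xs.length := by omega
    rw [PySem.List.pyRange_one_cons (by exact_mod_cast hkl), List.map_cons]
    have h2 : ((k : Int) + 1) = ((k + 1 : Nat) : Int) := by push_cast; ring
    rw [h2, ih (k + 1) (by omega), PySem.List.pyGetD_natCast,
      List.getD_eq_getElem _ _ hkl, List.drop_eq_getElem_cons hkl]

-- the loop of port A, characterised: updates every key occurring in ms, appends the new keys
lemma pvMainA (actor : String) : ∀ (ms : List String) (d : PySem.Dict String (List String)),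
    d.keys.Nodup →
    (ms.foldl (fun d m =>
        if d.contains m then d.insert m (PySem.Set.add (d.getD m []) actor)
        else
          (d.insert m PySem.Set.empty).insert m
            (PySem.Set.add ((d.insert m PySem.Set.empty).getD m PySem.Set.empty) actor)) d).items
      = d.items.map (fun kv => if kv.1 ∈ ms then (kv.1, PySem.Set.add kv.2 actor) else kv)
        ++ (pvNew ms d.keys).map (fun m => (m, PySem.Set.add PySem.Set.empty actor)) := by
  intro ms
  induction ms with
  | nil => intro d _; simp [pvNew]
  | cons m t ih =>
    intro d hnd
    rw [List.foldl_cons]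
    by_cases hc : d.contains m = true
    · rw [if_pos hc]
      have hmk : m ∈ d.keys := (PySem.Dict.contains_iff_mem_keys d m).mp hc
      have hk : (d.insert m (PySem.Set.add (d.getD m []) actor)).keys = d.keys :=
        PySem.Dict.keys_insert_of_contains d _ hc
      rw [ih _ (by rw [hk]; exact hnd), hk]
      have hnewpart : pvNew (m :: t) d.keys = pvNew t d.keys := by
        rw [pvNew, if_pos hmk]
      rw [hnewpart]
      congr 1
      rw [PySem.Dict.items_insert_of_contains d _ hc, List.map_map]
      apply List.map_congr_left
      intro p hp
      by_cases hpm : p.1 = m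
      · have hmem : (m, p.2) ∈ d.items := by rw [← hpm]; exact hp
        have hv : d.getD m [] = p.2 := PySem.Dict.getD_of_mem_items d hmem hnd []
        simp only [Function.comp_apply, hpm, beq_self_eq_true, if_pos, hv]
        by_cases hmt : m ∈ t <;>
          simp [hmt, pvAddIdem, hpm]
      · have hbe : (p.1 == m) = false := by simp [hpm]
        simp only [Function.comp_apply, hbe, Bool.false_eq_true, if_false]
        simp [List.mem_cons, hpm]
    · rw [if_neg hc]
      have hcf : d.contains m = false := by simpa using hc
      have hmk : m ∉ d.keys := fun hx => hc ((PySem.Dict.contains_iff_mem_keys d m).mpr hx)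
      have hstep :
          (d.insert m PySem.Set.empty).insert m
              (PySem.Set.add ((d.insert m PySem.Set.empty).getD m PySem.Set.empty) actor)
            = d.insert m (PySem.Set.add PySem.Set.empty actor) := by
        rw [PySem.Dict.getD_insert_self, PySem.Dict.insert_insert_self]
      rw [hstep]
      have hk : (d.insert m (PySem.Set.add PySem.Set.empty actor)).keys = d.keys ++ [m] :=
        PySem.Dict.keys_insert_of_not_contains d _ hcf
      have hnd' : (d.keys ++ [m]).Nodup := by
        rw [List.nodup_append]
        refine ⟨hnd, List.nodup_singleton m, ?_⟩
        intro a ha b hb heq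
        subst heq
        exact hmk ((by simpa using hb : a = m) ▸ ha)
      have hsing : List.map (fun kv : String × List String =>
            if kv.1 ∈ t then (kv.1, PySem.Set.add kv.2 actor) else kv)
            [(m, PySem.Set.add PySem.Set.empty actor)]
          = [(m, PySem.Set.add PySem.Set.empty actor)] := by
        by_cases hmt : m ∈ t <;> simp [hmt, pvAddIdem]
      have hnew : pvNew (m :: t) d.keys = m :: pvNew t (d.keys ++ [m]) := by
        rw [pvNew, if_neg hmk]
      rw [ih _ (by rw [hk]; exact hnd'), hk,
        PySem.Dict.items_insert_of_not_contains d _ hcf, List.map_append, hsing, hnew,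
        List.map_cons, List.append_assoc, List.singleton_append]
      congr 1
      apply List.map_congr_left
      intro p hp
      have hpm : p.1 ≠ m := fun hx => hmk (by rw [← hx]; exact List.mem_map.mpr ⟨p, hp, rfl⟩)
      simp [List.mem_cons, hpm]

-- the loop of port B: inserting the missing keys of a duplicate-free list appends them
lemma pvMainB (av : List String) : ∀ (u : List String) (r : PySem.Dict String (List String)),
    u.Nodup →
    (u.foldl (fun r m => if r.contains m then r else r.insert m av) r).items
      = r.items ++ (u.filter (fun m => !r.contains m)).map (fun m => (m, av)) := by
  intro u
  induction u with
  | nil => intro r _; simp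
  | cons m t ih =>
    intro r hnd
    have hmt : m ∉ t := (List.nodup_cons.mp hnd).1
    rw [List.foldl_cons]
    by_cases hc : r.contains m = true
    · rw [if_pos hc, List.filter_cons, ih _ (List.nodup_cons.mp hnd).2]
      simp [hc]
    · have hcf : r.contains m = false := by simpa using hc
      have hfil : List.filter (fun x => !(r.insert m av).contains x) t
          = List.filter (fun x => !r.contains x) t := by
        apply List.filter_congr
        intro x hx
        have hxm : x ≠ m := fun hxe => hmt (hxe ▸ hx)
        rw [PySem.Dict.contains_insert]
        simp [hxm]
      rw [if_neg hc, ih _ (List.nodup_cons.mp hnd).2, hfil,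
        PySem.Dict.items_insert_of_not_contains r av hcf, List.filter_cons]
      simp only [hcf, Bool.not_false, if_pos, List.map_cons, List.append_assoc,
        List.singleton_append]

-- bridge: the filtered set(ms) of port B is exactly the appended key list pvNew of port A
lemma pvG (keys : List String) : ∀ (ms s : List String),
    (ms.foldl PySem.Set.add s).filter (fun m => decide (m ∉ keys))
      = s.filter (fun m => decide (m ∉ keys)) ++ pvNew ms (keys ++ s) := by
  intro ms
  induction ms with
  | nil => intro s; simp [pvNew]
  | cons m t ih =>
    intro s
    rw [List.foldl_cons]
    by_cases hs : m ∈ s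
    · have hadd : PySem.Set.add s m = s := by simp [PySem.Set.add, PySem.Set.contains, hs]
      rw [hadd, ih s, pvNew, if_pos (by simp [hs])]
    · have hadd : PySem.Set.add s m = s ++ [m] := by simp [PySem.Set.add, PySem.Set.contains, hs]
      rw [hadd, ih (s ++ [m])]
      by_cases hk : m ∈ keys
      · rw [List.filter_append]
        have h1 : [m].filter (fun m => decide (m ∉ keys)) = [] := by simp [hk]
        rw [h1, List.append_nil, pvNew, if_pos (by simp [hk])]
        refine congrArg _ (pvNew_congr _ _ _ (fun x => ?_))
        by_cases hxm : x = m <;> simp [hxm, hk]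
      · rw [List.filter_append]
        have h1 : [m].filter (fun m => decide (m ∉ keys)) = [m] := by simp [hk]
        rw [h1, pvNew, if_neg (by simp [hk, hs]), List.append_assoc]
        simp only [List.singleton_append]
        rw [show keys ++ s ++ [m] = keys ++ (s ++ [m]) from List.append_assoc _ _ _]

-- bridge: port A's index loop over range(1, len) is a fold over the cleaned tail of the fields
lemma pvFoldRangeA (xs : List String) (actor : String) (b : PySem.Dict String (List String)) :
    (PySem.List.pyRange 1 (xs.length : Int)).foldl (fun d i =>
        if d.contains (pvClean (PySem.List.pyGetD xs i "")) then
          d.insert (pvClean (PySem.List.pyGetD xs i ""))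
            (PySem.Set.add (d.getD (pvClean (PySem.List.pyGetD xs i "")) []) actor)
        else
          (d.insert (pvClean (PySem.List.pyGetD xs i "")) PySem.Set.empty).insert
            (pvClean (PySem.List.pyGetD xs i ""))
            (PySem.Set.add ((d.insert (pvClean (PySem.List.pyGetD xs i "")) PySem.Set.empty).getD
              (pvClean (PySem.List.pyGetD xs i "")) PySem.Set.empty) actor)) b
      = ((xs.drop 1).map pvClean).foldl (fun d m =>
          if d.contains m then d.insert m (PySem.Set.add (d.getD m []) actor)
          else
            (d.insert m PySem.Set.empty).insert m
              (PySem.Set.add ((d.insert m PySem.Set.empty).getD m PySem.Set.empty) actor)) b := by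
  have hmap : (PySem.List.pyRange 1 (xs.length : Int)).map (fun i => PySem.List.pyGetD xs i "")
      = xs.drop 1 := by
    simpa using pvRangeMap xs (xs.length - 1) 1 rfl
  conv_rhs => rw [← hmap]
  rw [List.foldl_map, List.foldl_map]

-- the first component of port B's dict-comprehension entries is the original key
lemma pvFstUpd (actor : String) (ms : List String) (kv : String × List String) :
    ((if kv.1 ∈ ms then (kv.1, PySem.Set.add kv.2 actor) else kv)).1 = kv.1 := by
  by_cases h : kv.1 ∈ ms <;> simp [h]

theorem make_dict_spec : Claim_equal_make_dict := by
  intro line movie_dict _ hpre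
  unfold Spec_make_dict make_dict make_dict_alt
  dsimp only
  rw [pvFoldRangeA]
  have hslice : PySem.List.slice (pvSplitComma line) (some 1) none
      = (pvSplitComma line).drop 1 := by
    rw [PySem.List.slice_from _ (by norm_num)]
    rfl
  rw [hslice]
  -- shared names
  generalize (pvSplitComma line).headD "" = actor
  generalize hms : ((pvSplitComma line).drop 1).map pvClean = ms
  -- port B's comprehension, rewritten to port A's update function
  have hfun : (fun kv : String × List String =>
        if PySem.Set.contains (PySem.Set.ofList ms) kv.1
        then (kv.1, PySem.Set.union kv.2 [actor]) else kv)
      = (fun kv : String × List String =>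
        if kv.1 ∈ ms then (kv.1, PySem.Set.add kv.2 actor) else kv) := by
    funext kv
    have hc : PySem.Set.contains (PySem.Set.ofList ms) kv.1 = decide (kv.1 ∈ ms) := by
      simp [PySem.Set.contains, PySem.Set.mem_ofList]
    have hu : PySem.Set.union kv.2 [actor] = PySem.Set.add kv.2 actor := rfl
    rw [hc, hu]
    by_cases h : kv.1 ∈ ms <;> simp [h]
  rw [hfun]
  have hnd : (PySem.Dict.mk movie_dict).keys.Nodup := by
    rw [PySem.Dict.keys_mk]
    exact hpre
  rw [pvMainA actor ms (PySem.Dict.mk movie_dict) hnd,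
    pvMainB (PySem.Set.ofList [actor]) (PySem.Set.ofList ms) _ (PySem.Set.nodup_ofList ms)]
  have hkeys0 : (PySem.Dict.mk movie_dict).keys = movie_dict.map (fun p => p.1) :=
    PySem.Dict.keys_mk movie_dict
  -- the filtered set(ms) of port B is pvNew of port A
  have hfil : List.filter
        (fun m => !(PySem.Dict.mk (movie_dict.map (fun kv : String × List String =>
          if kv.1 ∈ ms then (kv.1, PySem.Set.add kv.2 actor) else kv))).contains m)
        (PySem.Set.ofList ms)
      = List.filter (fun m => decide (m ∉ movie_dict.map (fun p => p.1)))
        (PySem.Set.ofList ms) := by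
    apply List.filter_congr
    intro x _
    rw [PySem.Dict.contains_mk, List.any_map]
    have hany : ((fun p : String × List String => p.1 == x) ∘ fun kv =>
          if kv.1 ∈ ms then (kv.1, PySem.Set.add kv.2 actor) else kv)
        = (fun kv : String × List String => kv.1 == x) := by
      funext kv
      simp [Function.comp_apply, pvFstUpd]
    rw [hany, Bool.eq_iff_iff]
    simp [List.any_eq_true, List.mem_map, beq_iff_eq]
    constructor
    · intro h v hv
      exact h x v hv rfl
    · intro h a b hab hax
      exact h b (hax ▸ hab)
  rw [hfil]
  have hG : List.filter (fun m => decide (m ∉ movie_dict.map (fun p => p.1)))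
        (PySem.Set.ofList ms)
      = pvNew ms (movie_dict.map (fun p => p.1)) := by
    have := pvG (movie_dict.map (fun p => p.1)) ms []
    simpa [PySem.Set.ofList] using this
  rw [hG, hkeys0]
  have hav : (fun m : String => (m, PySem.Set.ofList [actor]))
      = (fun m : String => (m, PySem.Set.add PySem.Set.empty actor)) := rfl
  rw [hav]
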